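-- pv_equiv track=rewrite | github.com/Omastto1/General-Optimization-Solver | ga_fitness_functions/strip_packing_2d/best_fit_ga/best_fit.py | find_lowest_gap
-- ===== SOURCE A (Python) =====
-- def find_lowest_gap(skyline):
--     """
--     Find the starting index and width of the lowest gap in the skyline.
--
--     Parameters:
--         skyline (list of int): The skyline array.
--
--     Returns:
--         int, int: Starting index and width of the gap.
--     """
--
--     gap_start = -1  # Initialize the starting index of the gap
--     gap_width = 0   # Initialize the width of the gap
--
--     min_height = float('inf')  # Initialize the smallest height as infinity
--
--     for i, height in enumerate(skyline):
--         # Update the minimum height if a smaller height is found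
--         if height < min_height:
--             min_height = height
--             gap_start = i  # Update the gap start to the current index
--             gap_width = 1  # Start counting the gap width
--             extending_gap = True
--
--         # Increase the gap width if a height is equal to the smallest height
--         elif height == min_height and extending_gap:
--             gap_width += 1
--
--         # Exit the loop when exited smallest height section
--         elif height > min_height and gap_start != -1:
--             extending_gap = False
--
--     if gap_start == -1:
--         raise ValueError("No gap found in the skyline.")
--
--     return gap_start, gap_width, min_height
-- ===== SOURCE B (Python) =====
-- def find_lowest_gap(skyline):
--     """Lowest-gap finder: min, first index, run length (three simple passes)."""
--     if not skyline:
--         raise ValueError("No gap found in the skyline.")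
--     min_height = min(skyline)
--     gap_start = skyline.index(min_height)
--     gap_width = 0
--     for h in skyline[gap_start:]:
--         if h != min_height:
--             break
--         gap_width += 1
--     return gap_start, gap_width, min_height
-- ===== Notes on version B (the rewrite author's own statement) =====
-- stated objective: simpler
-- what changed: Replaces A's single fused scan with mutable gap state and an extending_gap flag by three plain passes: min(), index() for the first occurrence, and a forward count of the run of minimal heights.
import Mathlib
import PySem

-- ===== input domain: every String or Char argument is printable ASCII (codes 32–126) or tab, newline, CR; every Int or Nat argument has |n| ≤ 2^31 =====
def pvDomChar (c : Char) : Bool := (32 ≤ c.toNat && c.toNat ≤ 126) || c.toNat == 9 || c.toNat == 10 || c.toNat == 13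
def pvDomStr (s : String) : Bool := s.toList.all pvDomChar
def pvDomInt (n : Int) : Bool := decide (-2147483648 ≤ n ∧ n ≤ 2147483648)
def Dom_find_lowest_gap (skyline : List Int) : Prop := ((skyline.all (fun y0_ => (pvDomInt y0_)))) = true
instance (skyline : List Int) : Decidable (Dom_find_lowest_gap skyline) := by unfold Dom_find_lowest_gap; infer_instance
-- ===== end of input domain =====

-- B replaces A's fused single scan (mutable gap state + extending_gap flag) by three plain
-- passes: min, first index of the min, forward count of the run of minima — objective: simpler.

-- ===== PORT A =====
-- state = (gap_start, gap_width, min_height, extending_gap); min_height = none plays float('inf')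
def pvLoopA : Int → List Int → Int × Int × Option Int × Bool → Int × Int × Option Int × Bool
  | _, [], st => st
  | i, h :: t, (gs, gw, mh, ext) =>
    if (match mh with | none => true | some m => decide (h < m)) then
      pvLoopA (i + 1) t (i, 1, some h, true)
    else if mh == some h && ext then
      pvLoopA (i + 1) t (gs, gw + 1, mh, ext)
    else if (match mh with | none => false | some m => decide (m < h)) && gs != -1 then
      pvLoopA (i + 1) t (gs, gw, mh, false)
    else
      pvLoopA (i + 1) t (gs, gw, mh, ext)

def find_lowest_gap (skyline : List Int) : Int × Int × Int :=
  match pvLoopA 0 skyline (-1, 0, none, false) with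
  | (gs, gw, mh, _) =>
    if gs = -1 then (0, 0, 0)        -- Python raises ValueError here; excluded by Pre_
    else (gs, gw, mh.getD 0)

-- ===== PORT B =====
-- the 'for h in skyline[gap_start:]: if h != m: break; w += 1' loop
def pvCountRun (m : Int) : List Int → Int
  | [] => 0
  | h :: t => if h ≠ m then 0 else pvCountRun m t + 1

def find_lowest_gap_alt (skyline : List Int) : Int × Int × Int :=
  match PySem.List.min? skyline (fun x => x) with
  | none => (0, 0, 0)                -- Python raises ValueError here; excluded by Pre_
  | some m =>
    let gs : Nat := (PySem.List.index? skyline m).getD 0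
    ((gs : Int), pvCountRun m (PySem.List.slice skyline (some (gs : Int)) none), m)

-- ===== PRECONDITION & SPEC =====
-- Pre_ excludes only the empty list, on which both A and B raise ValueError("No gap found in the skyline.")
def Pre_find_lowest_gap (skyline : List Int) : Prop := skyline ≠ []
instance (skyline : List Int) : Decidable (Pre_find_lowest_gap skyline) := by unfold Pre_find_lowest_gap; infer_instance
def pvWitness_find_lowest_gap : List Int := [3, 1, 1, 4, 1]
def Spec_find_lowest_gap (skyline : List Int) (out : Int × Int × Int) : Prop := out = find_lowest_gap_alt skyline
instance (skyline : List Int) (out : Int × Int × Int) : Decidable (Spec_find_lowest_gap skyline out) := by unfold Spec_find_lowest_gap; infer_instance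

-- ===== CLAIM (what is proved, stated in full; the proofs are below) =====
def Claim_equal_find_lowest_gap : Prop := ∀ (skyline : List Int), Dom_find_lowest_gap skyline → Pre_find_lowest_gap skyline → Spec_find_lowest_gap skyline (find_lowest_gap skyline)

-- ===== LEMMAS AND PROOFS =====

-- spec-level description of A's loop state after a nonempty prefix p:
-- the minimum, its first index, the length of the run of minima starting there
def pvM : List Int → Int
  | [] => 0
  | x :: xs => xs.foldl min x

def pvI (p : List Int) : Nat := (PySem.List.index? p (pvM p)).getD 0

def pvW (p : List Int) : Int := pvCountRun (pvM p) (p.drop (pvI p))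

def pvStateOf (p : List Int) : Int × Int × Option Int × Bool :=
  ((pvI p : Int), pvW p, some (pvM p), (pvI p : Int) + pvW p == (p.length : Int))

theorem pvMin?_eq (x : Int) (xs : List Int) :
    PySem.List.min? (x :: xs) (fun y => y) = some (pvM (x :: xs)) := by
  rw [PySem.List.min?_id_cons]; rfl

theorem pvM_mem (x : Int) (xs : List Int) : pvM (x :: xs) ∈ x :: xs :=
  PySem.List.min?_mem (pvMin?_eq x xs)

theorem pvM_isMin (x : Int) (xs : List Int) : ∀ y ∈ x :: xs, pvM (x :: xs) ≤ y :=
  PySem.List.min?_isMin (pvMin?_eq x xs)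

theorem pvM_append (x : Int) (xs : List Int) (h : Int) :
    pvM ((x :: xs) ++ [h]) = min (pvM (x :: xs)) h := by
  simp [pvM, List.foldl_append]

theorem pvIndex?_eq (x : Int) (xs : List Int) :
    PySem.List.index? (x :: xs) (pvM (x :: xs)) = some (pvI (x :: xs)) := by
  have hmem := pvM_mem x xs
  rw [← PySem.List.index?_isSome_iff] at hmem
  obtain ⟨k, hk⟩ := Option.isSome_iff_exists.mp hmem
  rw [hk]; unfold pvI; rw [hk]; simp

theorem pvCountRun_nonneg (m : Int) (q : List Int) : 0 ≤ pvCountRun m q := by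
  induction q with
  | nil => simp [pvCountRun]
  | cons a t ih => simp only [pvCountRun]; split_ifs <;> omega

theorem pvCountRun_le_length (m : Int) (q : List Int) : pvCountRun m q ≤ (q.length : Int) := by
  induction q with
  | nil => simp [pvCountRun]
  | cons a t ih => simp only [pvCountRun, List.length_cons]; split_ifs <;> push_cast <;> omega

theorem pvCountRun_append_singleton (m : Int) (q : List Int) (h : Int) :
    pvCountRun m (q ++ [h]) =
      if pvCountRun m q = (q.length : Int) then
        pvCountRun m q + (if h = m then 1 else 0)
      else pvCountRun m q := by
  induction q with
  | nil => by_cases hm : h = m <;> simp [pvCountRun, hm]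
  | cons a t ih =>
    by_cases ha : a = m
    · have hle := pvCountRun_le_length m t
      simp only [List.cons_append, pvCountRun, ha, ne_eq, not_true_eq_false, if_false, ih,
        List.length_cons]
      split_ifs <;> push_cast at * <;> omega
    · have h0 : pvCountRun m (a :: t) = 0 := by simp [pvCountRun, ha]
      have hL : pvCountRun m ((a :: t) ++ [h]) = 0 := by
        simp [pvCountRun, ha]
      rw [hL, h0, if_neg (by simp only [List.length_cons]; push_cast; omega)]

theorem pvI_le_length (x : Int) (xs : List Int) : pvI (x :: xs) ≤ (x :: xs).length := by
  have hk := pvIndex?_eq x xs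
  obtain ⟨hlt, _, _⟩ := PySem.List.getElem_of_index?_eq_some hk
  omega

-- the loop step maintains the spec state
theorem pvStep (p : List Int) (h : Int)
    (hmem : pvM p ∈ p)
    (hisMin : ∀ y ∈ p, pvM p ≤ y)
    (hidx : PySem.List.index? p (pvM p) = some (pvI p))
    (hMapp : ∀ h' : Int, pvM (p ++ [h']) = min (pvM p) h') :
    pvLoopA (p.length : Int) [h] (pvStateOf p) = pvStateOf (p ++ [h]) := by
  obtain ⟨hIlt, -, -⟩ := PySem.List.getElem_of_index?_eq_some hidx
  have hIle : pvI p ≤ p.length := Nat.le_of_lt hIlt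
  have hW0 := pvCountRun_nonneg (pvM p) (p.drop (pvI p))
  have hWlen := pvCountRun_le_length (pvM p) (p.drop (pvI p))
  have hdrop : (p ++ [h]).drop (pvI p) = p.drop (pvI p) ++ [h] :=
    List.drop_append_of_le_length hIle
  have hdroplen : ((p.drop (pvI p)).length : Int) = (p.length : Int) - (pvI p : Int) := by
    rw [List.length_drop]; omega
  rw [hdroplen] at hWlen
  have hWdef : pvW p = pvCountRun (pvM p) (p.drop (pvI p)) := rfl
  have hWub : (pvI p : Int) + pvW p ≤ (p.length : Int) := by rw [hWdef]; omega
  rcases lt_trichotomy h (pvM p) with hlt | heq | hgt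
  · -- new minimum: state resets to (len p, 1, h, true)
    have hnot : h ∉ p := fun hmem' => absurd (hisMin h hmem') (by omega)
    have hm' : pvM (p ++ [h]) = h := by rw [hMapp, min_eq_right (le_of_lt hlt)]
    have hI' : pvI (p ++ [h]) = p.length := by
      unfold pvI; rw [hm', PySem.List.index?_append_singleton_self p h hnot]; rfl
    have hW' : pvW (p ++ [h]) = 1 := by
      unfold pvW; rw [hm', hI', List.drop_left]; simp [pvCountRun]
    have hL : pvLoopA (p.length : Int) [h] (pvStateOf p) =
        ((p.length : Int), 1, some h, true) := by
      simp only [pvStateOf, pvLoopA, (show decide (h < pvM p) = true by simp [hlt]), if_true]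
    rw [hL]
    unfold pvStateOf
    rw [hI', hW', hm']
    simp only [Prod.mk.injEq]
    refine ⟨trivial, trivial, trivial, ?_⟩
    symm
    simp only [beq_iff_eq, List.length_append, List.length_cons, List.length_nil]
    push_cast; omega
  · -- equal to the minimum
    have hbeq : (some (pvM p) == some h) = true := by simp [heq]
    have hm' : pvM (p ++ [h]) = pvM p := by rw [hMapp, heq, min_self]
    have hI' : pvI (p ++ [h]) = pvI p := by
      unfold pvI
      rw [hm', PySem.List.index?_append_of_mem [h] hmem, hidx]
    have hrun := pvCountRun_append_singleton (pvM p) (p.drop (pvI p)) h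
    by_cases hE : (pvI p : Int) + pvW p = (p.length : Int)
    · -- run reaches the end: width grows by one, extending stays true
      have hcond : pvCountRun (pvM p) (p.drop (pvI p)) = ((p.drop (pvI p)).length : Int) := by
        rw [← hWdef, hdroplen]; omega
      have hW' : pvW (p ++ [h]) = pvW p + 1 := by
        unfold pvW; rw [hm', hI', hdrop, hrun, if_pos hcond, if_pos heq]
      have hext : ((pvI p : Int) + pvW p == (p.length : Int)) = true := by
        simp only [beq_iff_eq]; exact hE
      have hL : pvLoopA (p.length : Int) [h] (pvStateOf p) =
          ((pvI p : Int), pvW p + 1, some (pvM p), true) := by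
        simp only [pvStateOf, pvLoopA, (show decide (h < pvM p) = false by simp; omega),
          Bool.false_eq_true, if_false, hext, hbeq, Bool.true_and, if_true]
      rw [hL]
      unfold pvStateOf
      rw [hI', hW', hm']
      simp only [Prod.mk.injEq]
      refine ⟨trivial, trivial, trivial, ?_⟩
      symm
      simp only [beq_iff_eq, List.length_append, List.length_cons, List.length_nil]
      push_cast; omega
    · -- run ended earlier: nothing changes (and extending stays false)
      have hcond : pvCountRun (pvM p) (p.drop (pvI p)) ≠ ((p.drop (pvI p)).length : Int) := by
        rw [← hWdef, hdroplen]; omega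
      have hW' : pvW (p ++ [h]) = pvW p := by
        unfold pvW; rw [hm', hI', hdrop, hrun, if_neg hcond]
      have hext : ((pvI p : Int) + pvW p == (p.length : Int)) = false := by
        simp only [beq_eq_false_iff_ne, ne_eq]; exact hE
      have hL : pvLoopA (p.length : Int) [h] (pvStateOf p) =
          ((pvI p : Int), pvW p, some (pvM p), false) := by
        simp only [pvStateOf, pvLoopA, (show decide (h < pvM p) = false by simp; omega),
          Bool.false_eq_true, if_false, hext, Bool.and_false,
          (show decide (pvM p < h) = false by simp; omega), Bool.false_and]
      rw [hL]
      unfold pvStateOf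
      rw [hI', hW', hm']
      simp only [Prod.mk.injEq]
      refine ⟨trivial, trivial, trivial, ?_⟩
      symm
      simp only [beq_eq_false_iff_ne, ne_eq, List.length_append, List.length_cons,
        List.length_nil]
      push_cast
      have hne' : (pvI p : Int) + pvW p ≠ (p.length : Int) := hE
      rw [← hdroplen] at hWlen
      rw [hWdef] at hne' ⊢
      rw [hdroplen] at hWlen
      omega
  · -- strictly larger: extending becomes false, the rest is unchanged
    have hm' : pvM (p ++ [h]) = pvM p := by rw [hMapp, min_eq_left (le_of_lt hgt)]
    have hI' : pvI (p ++ [h]) = pvI p := by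
      unfold pvI
      rw [hm', PySem.List.index?_append_of_mem [h] hmem, hidx]
    have hW' : pvW (p ++ [h]) = pvW p := by
      unfold pvW
      rw [hm', hI', hdrop, pvCountRun_append_singleton,
        if_neg (show ¬ h = pvM p by omega)]
      split_ifs <;> omega
    have hne : (some (pvM p) == some h) = false := by simp; omega
    have hgs : (((pvI p : Int)) != -1) = true := by simp
    have hL : pvLoopA (p.length : Int) [h] (pvStateOf p) =
        ((pvI p : Int), pvW p, some (pvM p), false) := by
      simp only [pvStateOf, pvLoopA, hne, (show decide (h < pvM p) = false by simp; omega),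
        (show decide (pvM p < h) = true by simp; omega), hgs, Bool.false_and, Bool.true_and,
        Bool.false_eq_true, if_false, if_true]
    rw [hL]
    unfold pvStateOf
    rw [hI', hW', hm']
    simp only [Prod.mk.injEq]
    refine ⟨trivial, trivial, trivial, ?_⟩
    symm
    simp only [beq_eq_false_iff_ne, ne_eq, List.length_append, List.length_cons, List.length_nil]
    push_cast
    rw [hWdef]
    omega

-- running the loop from the spec state of a nonempty prefix
theorem pvRun (t : List Int) (x : Int) (xs : List Int) :
    pvLoopA (((x :: xs).length : Int)) t (pvStateOf (x :: xs)) =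
      pvStateOf ((x :: xs) ++ t) := by
  induction t generalizing x xs with
  | nil => simp [pvLoopA]
  | cons h t ih =>
    have h1 : ∀ (i : Int) (st : Int × Int × Option Int × Bool),
        pvLoopA i (h :: t) st = pvLoopA (i + 1) t (pvLoopA i [h] st) := by
      intro i st
      obtain ⟨gs, gw, mh, ext⟩ := st
      simp only [pvLoopA]
      split_ifs <;> rfl
    rw [h1, pvStep (x :: xs) h (pvM_mem x xs) (pvM_isMin x xs) (pvIndex?_eq x xs)
      (fun h' => pvM_append x xs h')]
    have h2 : (((x :: xs).length : Int)) + 1 = (((x :: xs) ++ [h]).length : Int) := by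
      simp only [List.length_append, List.length_cons, List.length_nil]; push_cast; ring
    rw [h2]
    simpa [List.append_assoc] using ih x (xs ++ [h])

-- ===== VERDICT (by name: the statement is the Claim_ definition above) =====
theorem find_lowest_gap_spec : Claim_equal_find_lowest_gap := by
  intro skyline _ hpre
  obtain ⟨x, xs, rfl⟩ := List.exists_cons_of_ne_nil hpre
  unfold Spec_find_lowest_gap find_lowest_gap find_lowest_gap_alt
  have hfirst : pvLoopA 0 (x :: xs) (-1, 0, none, false) =
      pvLoopA 1 xs (0, 1, some x, true) := by
    simp [pvLoopA]
  have hx : (0, 1, some x, true) = pvStateOf [x] := by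
    simp [pvStateOf, pvM, pvI, pvW, pvCountRun]
  have hrun := pvRun xs x []
  simp only [List.length_cons, List.length_nil, List.cons_append, List.nil_append] at hrun
  rw [hfirst, hx, (by norm_num : (1 : Int) = ((1 : Nat) : Int)), hrun]
  have hidx := pvIndex?_eq x xs
  have hI0 := pvI_le_length x xs
  have hslice : PySem.List.slice (x :: xs) (some ((pvI (x :: xs)) : Int)) none =
      (x :: xs).drop (pvI (x :: xs)) := by
    rw [PySem.List.slice_from (x :: xs) (Int.natCast_nonneg _)]
    simp
  simp only [pvStateOf, pvMin?_eq, hidx, Option.getD_some, hslice]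
  split_ifs with hc
  · exfalso; omega
  · rfl
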